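-- pv_equiv track=rewrite | github.com/valentinsoare/WithPython | countingDuplicateWords.py | parse_the_counter_dict
-- ===== SOURCE A (Python) =====
-- import operator
--
-- def parse_the_counter_dict(given_dict):
--     given_dict = dict(sorted(given_dict.items(), key=operator.itemgetter(1)))
--     number_of_duplicate_words = 0
--     dict_with_duplicate_words = {}
--
--     for word, count in given_dict.items():
--         if count > 1:
--             number_of_duplicate_words += 1
--             dict_with_duplicate_words.update({word: count})
--
--     return dict_with_duplicate_words, number_of_duplicate_words
-- ===== SOURCE B (Python) =====
-- def parse_the_counter_dict(given_dict):
--     buckets = {}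
--     for word, count in given_dict.items():
--         if count > 1:
--             buckets.setdefault(count, []).append(word)
--     dict_with_duplicate_words = {}
--     number_of_duplicate_words = 0
--     for count in sorted(buckets):
--         for word in buckets[count]:
--             dict_with_duplicate_words[word] = count
--             number_of_duplicate_words += 1
--     return dict_with_duplicate_words, number_of_duplicate_words
-- ===== Notes on version B (the rewrite author's own statement) =====
-- stated objective: faster
-- what changed: B groups the duplicate words into buckets keyed by their count (a dict count -> list of words built in one pass), then sorts only the distinct counts and emits the buckets in increasing-count order, instead of A's comparison sort of all (word,count) pairs followed by a filtering loop with an incrementing accumulator.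
import Mathlib
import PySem

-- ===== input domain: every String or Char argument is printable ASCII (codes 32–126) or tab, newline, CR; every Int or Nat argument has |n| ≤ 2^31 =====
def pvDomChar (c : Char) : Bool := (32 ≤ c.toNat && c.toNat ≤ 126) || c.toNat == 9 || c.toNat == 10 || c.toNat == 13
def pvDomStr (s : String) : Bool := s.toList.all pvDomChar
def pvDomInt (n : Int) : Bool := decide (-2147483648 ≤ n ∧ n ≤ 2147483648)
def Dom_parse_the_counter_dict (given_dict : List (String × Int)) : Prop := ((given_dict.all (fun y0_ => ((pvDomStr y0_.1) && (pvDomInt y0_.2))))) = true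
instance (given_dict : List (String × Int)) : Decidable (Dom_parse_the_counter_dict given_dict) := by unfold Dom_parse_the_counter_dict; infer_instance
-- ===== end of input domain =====

-- B groups the duplicate words into count-keyed buckets in one pass, sorts only the
-- distinct counts and emits the buckets in increasing-count order — a different
-- algorithm from A's sort of all pairs followed by a filtering loop.

-- ===== PORT A =====
def parse_the_counter_dict (given_dict : List (String × Int)) : (List (String × Int)) × Int :=
  -- given_dict = dict(sorted(given_dict.items(), key=operator.itemgetter(1)))
  let gd : PySem.Dict String Int :=
    PySem.Dict.ofList (PySem.List.sorted given_dict (fun wc => wc.2))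
  -- for word, count in given_dict.items(): if count > 1: …
  let st :=
    gd.items.foldl
      (fun (st : Int × PySem.Dict String Int) wc =>
        if 1 < wc.2 then (st.1 + 1, st.2.insert wc.1 wc.2) else st)
      (0, PySem.Dict.empty)
  (st.2.items, st.1)

-- ===== PORT B =====
def parse_the_counter_dict_alt (given_dict : List (String × Int)) : (List (String × Int)) × Int :=
  -- buckets.setdefault(count, []).append(word)  ≡  buckets[count] = buckets.get(count, []) + [word]  = Dict.modify
  let buckets : PySem.Dict Int (List String) :=
    given_dict.foldl
      (fun b wc => if 1 < wc.2 then b.modify wc.2 [] (fun ws => ws ++ [wc.1]) else b)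
      PySem.Dict.empty
  -- for count in sorted(buckets): for word in buckets[count]: …
  let st :=
    (PySem.List.sorted buckets.keys (fun c => c)).foldl
      (fun (st : PySem.Dict String Int × Int) c =>
        (buckets.getD c []).foldl
          (fun (st : PySem.Dict String Int × Int) w => (st.1.insert w c, st.2 + 1)) st)
      (PySem.Dict.empty, 0)
  (st.1.items, st.2)

-- ===== PRECONDITION & SPEC =====
-- Pre_: the association list encodes a Python dict, so its keys are pairwise distinct
-- (the Python function receives a dict; duplicate keys cannot occur there).
def Pre_parse_the_counter_dict (given_dict : List (String × Int)) : Prop :=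
  (given_dict.map Prod.fst).Nodup
instance (given_dict : List (String × Int)) : Decidable (Pre_parse_the_counter_dict given_dict) := by
  unfold Pre_parse_the_counter_dict; infer_instance

def pvWitness_parse_the_counter_dict : (List (String × Int)) := [("a", 2), ("b", 1), ("c", 3)]

def Spec_parse_the_counter_dict (given_dict : List (String × Int)) (out : (List (String × Int)) × Int) : Prop := out = parse_the_counter_dict_alt given_dict
instance (given_dict : List (String × Int)) (out : (List (String × Int)) × Int) : Decidable (Spec_parse_the_counter_dict given_dict out) := by unfold Spec_parse_the_counter_dict; infer_instance

-- ===== CLAIM (what is proved, stated in full; the proofs are below) =====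
def Claim_equal_parse_the_counter_dict : Prop := ∀ (given_dict : List (String × Int)), Dom_parse_the_counter_dict given_dict → Pre_parse_the_counter_dict given_dict → Spec_parse_the_counter_dict given_dict (parse_the_counter_dict given_dict)

-- ===== LEMMAS AND PROOFS =====

-- insertBy puts x at the head when x goes before every element
theorem insertBy_eq_cons {α : Type} (b : α → α → Bool) (x : α) (l : List α)
    (h : ∀ z ∈ l, b x z = true) : PySem.List.insertBy b x l = x :: l := by
  cases l with
  | nil => rfl
  | cons y ys => simp [PySem.List.insertBy, h y (by simp)]

-- insertBy skips over a prefix none of whose elements x goes before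
theorem insertBy_append_not_before {α : Type} (b : α → α → Bool) (x : α) (A B : List α)
    (h : ∀ z ∈ A, b x z = false) :
    PySem.List.insertBy b x (A ++ B) = A ++ PySem.List.insertBy b x B := by
  induction A with
  | nil => rfl
  | cons y ys ih =>
    have hy : b x y = false := h y (by simp)
    simp only [List.cons_append, PySem.List.insertBy, hy, Bool.false_eq_true, if_false]
    rw [ih (fun z hz => h z (by simp [hz]))]

-- inserting x into the bucket decomposition lands it at the end of its own bucket
theorem insertBy_flatMap (ks : List Int) (L : List (String × Int)) (x : String × Int)
    (hks : ks.Pairwise (· < ·)) (hx : x.2 ∈ ks) :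
    PySem.List.insertBy (fun a b => decide (a.2 < b.2)) x
        (ks.flatMap (fun c => L.filter (fun wc => wc.2 == c))) =
      ks.flatMap (fun c => (L ++ [x]).filter (fun wc => wc.2 == c)) := by
  induction ks with
  | nil => cases hx
  | cons c ks' ih =>
    rw [List.pairwise_cons] at hks
    have hfilt : ∀ c', (L ++ [x]).filter (fun wc => wc.2 == c') =
        L.filter (fun wc => wc.2 == c') ++ (if x.2 = c' then [x] else []) := by
      intro c'
      rw [List.filter_append]
      by_cases hxc : x.2 = c' <;> simp [hxc]
    by_cases hxc : x.2 = c
    · -- x belongs to the head bucket: skip that bucket, land right after it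
      simp only [List.flatMap_cons]
      rw [insertBy_append_not_before _ _ _ _ (by
        intro z hz
        have : z.2 = c := by simpa using (List.mem_filter.1 hz).2
        simp [this, hxc])]
      rw [insertBy_eq_cons _ _ _ (by
        intro z hz
        rcases List.mem_flatMap.1 hz with ⟨c', hc', hzmem⟩
        have hz2 : z.2 = c' := by simpa using (List.mem_filter.1 hzmem).2
        have : c < c' := hks.1 c' hc'
        simp [hz2, hxc]; omega)]
      have hrest : ks'.flatMap (fun c' => (L ++ [x]).filter (fun wc => wc.2 == c')) =
          ks'.flatMap (fun c' => L.filter (fun wc => wc.2 == c')) := by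
        apply List.flatMap_congr
        intro c' hc'
        have hlt : c < c' := hks.1 c' hc'
        rw [hfilt c']
        have : ¬ x.2 = c' := by omega
        simp [this]
      rw [hfilt c, hrest]
      simp [hxc]
    · -- x belongs to a later bucket
      have hx' : x.2 ∈ ks' := by
        rcases List.mem_cons.1 hx with h | h
        · exact absurd h hxc
        · exact h
      simp only [List.flatMap_cons]
      rw [insertBy_append_not_before _ _ _ _ (by
        intro z hz
        have hz2 : z.2 = c := by simpa using (List.mem_filter.1 hz).2
        have : c < x.2 := hks.1 x.2 hx'
        simp [hz2]; omega)]
      rw [ih hks.2 hx', hfilt c]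
      simp [hxc]

-- the bucket decomposition along strictly increasing keys IS the stable sort by count
theorem flatMap_buckets_eq_sorted (ks : List Int) (L : List (String × Int))
    (hks : ks.Pairwise (· < ·)) (hcov : ∀ wc ∈ L, wc.2 ∈ ks) :
    ks.flatMap (fun c => L.filter (fun wc => wc.2 == c)) =
      PySem.List.sorted L (fun wc => wc.2) := by
  rw [PySem.List.sorted_eq_foldl_insertBy]
  induction L using List.reverseRecOn with
  | nil => simp
  | append_singleton L x ih =>
    rw [List.foldl_append]
    simp only [List.foldl_cons, List.foldl_nil]
    rw [← ih (fun wc hwc => hcov wc (by simp [hwc]))]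
    exact (insertBy_flatMap ks L x hks (hcov x (by simp))).symm

-- a fold over nested buckets is a fold over the flattened list
theorem foldl_flatMap_eq {α β σ : Type} (ks : List α) (h : α → List β)
    (g : σ → β → σ) (init : σ) :
    ks.foldl (fun s c => (h c).foldl g s) init = (ks.flatMap h).foldl g init := by
  induction ks generalizing init with
  | nil => rfl
  | cons c ks' ih => simp [List.flatMap_cons, List.foldl_append, ih]

-- counting fold
theorem foldl_count_len {β : Type} (l : List β) (a : Int) :
    l.foldl (fun (n : Int) _ => n + 1) a = a + l.length := by
  induction l generalizing a with
  | nil => simp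
  | cons x t ih => simp [ih]; omega

-- insertBy (by key <) preserves key-sortedness
theorem pairwise_insertBy (x : String × Int) (l : List (String × Int))
    (h : l.Pairwise (fun a b => a.2 ≤ b.2)) :
    (PySem.List.insertBy (fun a b => decide (a.2 < b.2)) x l).Pairwise
      (fun a b => a.2 ≤ b.2) := by
  induction l with
  | nil => simp [PySem.List.insertBy]
  | cons y ys ih =>
    rw [List.pairwise_cons] at h
    by_cases hxy : x.2 < y.2
    · simp only [PySem.List.insertBy, hxy, decide_true, if_true]
      refine List.pairwise_cons.2 ⟨?_, List.pairwise_cons.2 ⟨h.1, h.2⟩⟩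
      intro z hz
      rcases List.mem_cons.1 hz with rfl | hz
      · omega
      · have := h.1 z hz; omega
    · simp only [PySem.List.insertBy, hxy, decide_false, Bool.false_eq_true, if_false]
      refine List.pairwise_cons.2 ⟨?_, ih h.2⟩
      intro z hz
      rcases (PySem.List.mem_insertBy _ _ _ _).1 hz with rfl | hz
      · omega
      · exact h.1 z hz

-- filtering commutes with inserting into a key-sorted list
theorem filter_insertBy (p : String × Int → Bool) (x : String × Int)
    (l : List (String × Int)) (h : l.Pairwise (fun a b => a.2 ≤ b.2)) :
    (PySem.List.insertBy (fun a b => decide (a.2 < b.2)) x l).filter p =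
      if p x then
        PySem.List.insertBy (fun a b => decide (a.2 < b.2)) x (l.filter p)
      else l.filter p := by
  induction l with
  | nil => cases hpx : p x <;> simp [PySem.List.insertBy, List.filter, hpx]
  | cons y ys ih =>
    rw [List.pairwise_cons] at h
    by_cases hxy : x.2 < y.2
    · -- x goes right before y
      have hkey : ∀ z ∈ (y :: ys).filter p, decide (x.2 < z.2) = true := by
        intro z hz
        have hz' := List.mem_of_mem_filter hz
        rcases List.mem_cons.1 hz' with rfl | hz'
        · simp; omega
        · have := h.1 z hz'; simp; omega
      rw [insertBy_eq_cons _ _ ((y :: ys).filter p) hkey] at *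
      simp only [PySem.List.insertBy, hxy, decide_true, if_true]
      cases hpx : p x
      · simp [List.filter, hpx]
      · simp [List.filter, hpx]
    · simp only [PySem.List.insertBy, hxy, decide_false, Bool.false_eq_true, if_false]
      cases hpx : p x <;> cases hpy : p y <;>
        simp [List.filter, hpx, hpy, ih h.2, PySem.List.insertBy, hxy]

-- filtering commutes with the whole insertion-sort fold
theorem filter_foldl_insertBy (p : String × Int → Bool) (xs acc : List (String × Int))
    (h : acc.Pairwise (fun a b => a.2 ≤ b.2)) :
    (xs.foldl (fun acc x =>
        PySem.List.insertBy (fun a b => decide (a.2 < b.2)) x acc) acc).filter p =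
      (xs.filter p).foldl (fun acc x =>
        PySem.List.insertBy (fun a b => decide (a.2 < b.2)) x acc) (acc.filter p) := by
  induction xs generalizing acc with
  | nil => simp
  | cons x t ih =>
    simp only [List.foldl_cons]
    rw [ih _ (pairwise_insertBy x acc h), filter_insertBy p x acc h]
    cases hpx : p x <;> simp [List.filter, hpx]

-- the stable sort commutes with filtering
theorem sorted_filter_comm (p : String × Int → Bool) (xs : List (String × Int)) :
    (PySem.List.sorted xs (fun wc => wc.2)).filter p =
      PySem.List.sorted (xs.filter p) (fun wc => wc.2) := by
  rw [PySem.List.sorted_eq_foldl_insertBy, PySem.List.sorted_eq_foldl_insertBy]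
  exact filter_foldl_insertBy p xs [] (by simp)

-- dict(pairs) over distinct keys keeps the list as is
theorem ofList_items_of_nodup (l : List (String × Int)) (h : (l.map Prod.fst).Nodup) :
    (PySem.Dict.ofList l).items = l := by
  have := PySem.Dict.items_foldl_insert_fresh (l := l) (k := Prod.fst) (v := Prod.snd)
    (d := PySem.Dict.empty) (by intro a _; simp [PySem.Dict.contains_empty]) h
  simpa [PySem.Dict.ofList, PySem.Dict.update] using this

-- A's loop over a distinct-keyed list: the built dict is the filtered list, the counter its length
theorem loopA (L : List (String × Int)) (d : PySem.Dict String Int) (n : Int)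
    (h : (d.keys ++ L.map Prod.fst).Nodup) :
    L.foldl (fun (st : Int × PySem.Dict String Int) wc =>
        if 1 < wc.2 then (st.1 + 1, st.2.insert wc.1 wc.2) else st) (n, d) =
      (n + (L.filter (fun wc => 1 < wc.2)).length,
       PySem.Dict.mk (d.items ++ L.filter (fun wc => 1 < wc.2))) := by
  induction L generalizing d n with
  | nil =>
    simp
  | cons x t ih =>
    have hx : d.contains x.1 = false := by
      cases hcc : d.contains x.1
      · rfl
      · exfalso
        have hmem := (PySem.Dict.contains_iff_mem_keys d x.1).1 hcc
        simp only [List.map_cons, List.nodup_append] at h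
        exact h.2.2 x.1 hmem x.1 (List.mem_cons_self) rfl
    by_cases hpx : 1 < x.2
    · simp only [List.foldl_cons, hpx, if_true]
      have hins : (d.insert x.1 x.2).items = d.items ++ [x] := by
        rw [PySem.Dict.items_insert_of_not_contains d x.2 hx]
      have hkeys : (d.insert x.1 x.2).keys = d.keys ++ [x.1] := by
        rw [PySem.Dict.keys_insert_of_not_contains d x.2 hx]
      have h' : ((d.insert x.1 x.2).keys ++ t.map Prod.fst).Nodup := by
        rw [hkeys]
        simp only [List.map_cons] at h
        simpa [List.append_assoc] using h
      rw [ih (d.insert x.1 x.2) (n + 1) h']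
      simp [hins, hpx]
      omega
    · simp only [List.foldl_cons, hpx, if_false]
      have h' : (d.keys ++ t.map Prod.fst).Nodup := by
        have hsub : (d.keys ++ t.map Prod.fst).Sublist (d.keys ++ (x :: t).map Prod.fst) := by
          simp only [List.map_cons]
          exact (List.Sublist.refl _).append (List.sublist_cons_self _ _)
        exact hsub.nodup h
      rw [ih d n h']
      simp [hpx]

-- B's fresh-key dict-building fold over a flat pair list
theorem loopB (P : List (String × Int)) (h : (P.map Prod.fst).Nodup) :
    (P.foldl (fun (d : PySem.Dict String Int) wc => d.insert wc.1 wc.2)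
        PySem.Dict.empty).items = P := by
  have := PySem.Dict.items_foldl_insert_fresh (l := P) (k := Prod.fst) (v := Prod.snd)
    (d := PySem.Dict.empty) (by intro a _; simp [PySem.Dict.contains_empty]) h
  simpa using this

-- ===== VERDICT (by name: the statement is the Claim_ definition above) =====
theorem parse_the_counter_dict_spec : Claim_equal_parse_the_counter_dict := by
  intro xs _ hpre
  unfold Spec_parse_the_counter_dict
  -- F: the duplicate entries, in original order
  set F : List (String × Int) := xs.filter (fun wc => decide (1 < wc.2)) with hF
  have hnodF : (F.map Prod.fst).Nodup := (List.filter_sublist.map Prod.fst).nodup hpre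
  have hnodSF : ((PySem.List.sorted F (fun wc => wc.2)).map Prod.fst).Nodup :=
    (((PySem.List.sorted_perm F (fun wc => wc.2) false).map Prod.fst).nodup_iff).2 hnodF
  -- ===== A's side: A = (sorted F, |F|) =====
  have hperm : (PySem.List.sorted xs (fun wc => wc.2)).Perm xs :=
    PySem.List.sorted_perm xs _ false
  have hnods : ((PySem.List.sorted xs (fun wc => wc.2)).map Prod.fst).Nodup :=
    ((hperm.map Prod.fst).nodup_iff).2 hpre
  have hitems := ofList_items_of_nodup _ hnods
  have hcomm := sorted_filter_comm (fun wc => decide (1 < wc.2)) xs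
  have hA : parse_the_counter_dict xs =
      (PySem.List.sorted F (fun wc => wc.2), (F.length : Int)) := by
    unfold parse_the_counter_dict
    simp only [hitems]
    rw [loopA _ PySem.Dict.empty 0 (by simpa [PySem.Dict.keys] using hnods)]
    simp only [PySem.Dict.empty, List.nil_append, hcomm, ← hF]
    rw [(PySem.List.sorted_perm F (fun wc => wc.2) false).length_eq]
    simp
  rw [hA]
  -- ===== B's side: B = (sorted F, |F|) as well =====
  -- 1. the guarded bucket fold is the fold over F
  have hb1 : xs.foldl
      (fun (b : PySem.Dict Int (List String)) wc =>
        if 1 < wc.2 then b.modify wc.2 [] (fun ws => ws ++ [wc.1]) else b)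
      PySem.Dict.empty =
      F.foldl (fun b wc => b.modify wc.2 [] (fun ws => ws ++ [wc.1])) PySem.Dict.empty := by
    rw [hF, List.foldl_filter]
    apply PySem.List.foldl_congr_mem
    intro acc wc _
    by_cases h : 1 < wc.2 <;> simp [h]
  unfold parse_the_counter_dict_alt
  simp only [hb1]
  set buckets : PySem.Dict Int (List String) :=
    F.foldl (fun b wc => b.modify wc.2 [] (fun ws => ws ++ [wc.1])) PySem.Dict.empty
    with hbuckets
  -- 2. bucket contents: words of F with that count, in order
  have hgetD : ∀ c, buckets.getD c [] =
      (F.filter (fun wc => wc.2 == c)).map Prod.fst := by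
    intro c
    have hswap : F.foldl (fun b wc => b.modify wc.2 [] (fun ws => ws ++ [wc.1]))
        PySem.Dict.empty =
        (F.map Prod.swap).foldl (fun b p => b.modify p.1 [] (fun ws => ws ++ [p.2]))
          PySem.Dict.empty := by
      rw [List.foldl_map]; rfl
    rw [hbuckets, hswap, PySem.Dict.getD_foldl_modify_append]
    simp [List.filter_map, Function.comp_def, List.map_map]
  -- 3. bucket keys: the distinct counts of F
  have hkeys : buckets.keys = PySem.Set.ofList (F.map (fun wc => wc.2)) := by
    rw [hbuckets]
    have := PySem.Dict.keys_foldl_modify_key (l := F) (key := fun wc => wc.2)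
      (d0 := ([] : List String)) (f := fun _ wc ws => ws ++ [wc.1]) (d := PySem.Dict.empty)
    simpa [PySem.Dict.keys_empty, PySem.Set.update, PySem.Set.ofList_eq_foldl] using this
  set ks := PySem.List.sorted buckets.keys (fun c => c) with hks
  have hkslt : ks.Pairwise (· < ·) := by
    rw [hks, hkeys]; exact PySem.List.sorted_ofList_pairwise_lt _
  have hcov : ∀ wc ∈ F, wc.2 ∈ ks := by
    intro wc hwc
    rw [hks, PySem.List.mem_sorted, hkeys, PySem.Set.mem_ofList]
    exact List.mem_map_of_mem hwc
  -- 4. the nested emission loop is a fold over the flattened buckets = sorted F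
  have hinner : ∀ (st : PySem.Dict String Int × Int) c,
      (buckets.getD c []).foldl (fun st w => (st.1.insert w c, st.2 + 1)) st =
      (F.filter (fun wc => wc.2 == c)).foldl
        (fun st wc => (st.1.insert wc.1 wc.2, st.2 + 1)) st := by
    intro st c
    rw [hgetD c, List.foldl_map]
    apply PySem.List.foldl_congr_mem
    intro acc wc hwc
    have : wc.2 = c := by simpa using (List.mem_filter.1 hwc).2
    rw [this]
  have houter : ks.foldl
      (fun (st : PySem.Dict String Int × Int) c =>
        (buckets.getD c []).foldl (fun st w => (st.1.insert w c, st.2 + 1)) st)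
      (PySem.Dict.empty, 0) =
      (PySem.List.sorted F (fun wc => wc.2)).foldl
        (fun (st : PySem.Dict String Int × Int) wc => (st.1.insert wc.1 wc.2, st.2 + 1))
        (PySem.Dict.empty, 0) := by
    calc ks.foldl _ (PySem.Dict.empty, 0)
        = ks.foldl (fun (st : PySem.Dict String Int × Int) c =>
            (F.filter (fun wc => wc.2 == c)).foldl
              (fun st wc => (st.1.insert wc.1 wc.2, st.2 + 1)) st)
            (PySem.Dict.empty, 0) := by
          apply PySem.List.foldl_congr_mem
          intro st c _
          exact hinner st c
      _ = (ks.flatMap (fun c => F.filter (fun wc => wc.2 == c))).foldl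
            (fun (st : PySem.Dict String Int × Int) wc =>
              (st.1.insert wc.1 wc.2, st.2 + 1)) (PySem.Dict.empty, 0) :=
          foldl_flatMap_eq ks _ _ _
      _ = _ := by rw [flatMap_buckets_eq_sorted ks F hkslt hcov]
  rw [houter]
  rw [PySem.List.foldl_prod_mk
    (f := fun (d : PySem.Dict String Int) (wc : String × Int) => d.insert wc.1 wc.2)
    (g := fun (n : Int) (_ : String × Int) => n + 1)]
  simp only [loopB _ hnodSF, foldl_count_len]
  rw [(PySem.List.sorted_perm F (fun wc => wc.2) false).length_eq]
  simp
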